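-- pv_equiv track=rewrite | github.com/code-kiwi/Advent_of_Code | 14/script1.py | eval_grid_order
-- ===== SOURCE A (Python) =====
-- def eval_grid_order(grid):
--     order = len(grid)
--     res = 0
--     for i in range(len(grid)):
--         for j in range(len(grid[i])):
--             if grid[i][j] == "O":
--                 res += order
--         order -= 1
--     return res
-- ===== SOURCE B (Python) =====
-- def eval_grid_order(grid):
--     # staged passes, bottom-up: first collect per-row 'O' counts, then walk
--     # the counts from the BOTTOM row up, with an increasing depth weight
--     # (bottom row weighs 1, top row weighs len(grid)).
--     counts = []
--     for row in grid:
--         c = 0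
--         for cell in row:
--             if cell == "O":
--                 c += 1
--         counts.append(c)
--     total = 0
--     depth = 0
--     for c in reversed(counts):
--         depth += 1
--         total += depth * c
--     return total
-- ===== Notes on version B (the rewrite author's own statement) =====
-- stated objective: alternative
-- what changed: two staged passes instead of one weighted scan: first a pass collecting per-row 'O' counts, then a bottom-up pass over the reversed counts with an increasing depth weight (bottom row 1 .. top row n), instead of A's single top-down scan with a decreasing counter
import Mathlib
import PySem

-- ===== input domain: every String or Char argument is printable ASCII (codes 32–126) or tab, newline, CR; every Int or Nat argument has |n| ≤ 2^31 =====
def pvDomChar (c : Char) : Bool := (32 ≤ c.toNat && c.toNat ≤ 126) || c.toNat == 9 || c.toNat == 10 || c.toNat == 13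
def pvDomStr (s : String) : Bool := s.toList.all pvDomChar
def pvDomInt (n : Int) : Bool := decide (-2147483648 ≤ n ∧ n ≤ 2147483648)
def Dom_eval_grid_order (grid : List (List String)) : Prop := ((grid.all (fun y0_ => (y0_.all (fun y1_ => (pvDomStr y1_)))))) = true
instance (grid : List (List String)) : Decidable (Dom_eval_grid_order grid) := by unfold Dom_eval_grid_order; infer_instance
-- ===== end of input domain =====

-- B scores the grid in two staged passes (per-row 'O' counts, then a bottom-up weighted sum) instead of A's single top-down scan with a decreasing weight.

-- ===== PORT A =====
-- state: (order, res); outer loop over rows, inner loop over cells, res += order per 'O', order -= 1 per row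
def eval_grid_order (grid : List (List String)) : Int :=
  (grid.foldl
    (fun (st : Int × Int) row =>
      (st.1 - 1,
       row.foldl (fun r cell => if cell == "O" then r + st.1 else r) st.2))
    ((grid.length : Int), 0)).2

-- ===== PORT B =====
-- pass 1: build the list of per-row 'O' counts; pass 2: walk the counts reversed with an increasing depth, adding depth * count
def eval_grid_order_alt (grid : List (List String)) : Int :=
  let counts := grid.foldl
    (fun (acc : List Int) row =>
      acc ++ [row.foldl (fun c cell => if cell == "O" then c + 1 else c) 0])
    []
  (counts.reverse.foldl
    (fun (st : Int × Int) c => (st.1 + 1, st.2 + (st.1 + 1) * c))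
    (0, 0)).2

-- ===== PRECONDITION & SPEC =====
def Spec_eval_grid_order (grid : List (List String)) (out : Int) : Prop := out = eval_grid_order_alt grid
instance (grid : List (List String)) (out : Int) : Decidable (Spec_eval_grid_order grid out) := by unfold Spec_eval_grid_order; infer_instance

-- ===== CLAIM (what is proved, stated in full; the proofs are below) =====
def Claim_equal_eval_grid_order : Prop := ∀ (grid : List (List String)), Dom_eval_grid_order grid → Spec_eval_grid_order grid (eval_grid_order grid)

-- ===== LEMMAS AND PROOFS =====

-- number of "O" cells in a row
def pvCnt (row : List String) : Int :=
  row.foldl (fun c cell => if cell == "O" then c + 1 else c) 0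

lemma inner_count (row : List String) (c : Int) :
    row.foldl (fun c cell => if cell == "O" then c + 1 else c) c = c + pvCnt row := by
  unfold pvCnt
  induction row generalizing c with
  | nil => simp
  | cons x xs ih =>
    simp only [List.foldl_cons]
    rw [ih, ih (if (x == "O") = true then (0 : Int) + 1 else 0)]
    split_ifs <;> ring

lemma pvCnt_cons (x : String) (xs : List String) :
    pvCnt (x :: xs) = (if (x == "O") = true then 1 else 0) + pvCnt xs := by
  have h : pvCnt (x :: xs) = xs.foldl (fun c cell => if cell == "O" then c + 1 else c)
      ((fun (c : Int) cell => if cell == "O" then c + 1 else c) 0 x) := rfl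
  rw [h, inner_count]
  by_cases hx : (x == "O") = true <;> simp [hx]

lemma inner_shift (row : List String) (w r : Int) :
    row.foldl (fun r cell => if cell == "O" then r + w else r) r = r + w * pvCnt row := by
  induction row generalizing r with
  | nil => simp [pvCnt]
  | cons x xs ih =>
    simp only [List.foldl_cons]
    rw [ih, pvCnt_cons]
    split_ifs <;> ring

-- top-down weighted sum of a count list, starting weight o, weight decreasing
def pvW (o : Int) : List Int → Int
  | [] => 0
  | c :: cs => o * c + pvW (o - 1) cs

-- bottom-up weighted sum of a count list, depth starting at d, weight increasing
def pvG (d : Int) : List Int → Int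
  | [] => 0
  | c :: cs => (d + 1) * c + pvG (d + 1) cs

lemma foldA (grid : List (List String)) (o r : Int) :
    (grid.foldl
      (fun (st : Int × Int) row =>
        (st.1 - 1,
         row.foldl (fun r cell => if cell == "O" then r + st.1 else r) st.2))
      (o, r)).2 = r + pvW o (grid.map pvCnt) := by
  induction grid generalizing o r with
  | nil => simp [pvW]
  | cons row rest ih =>
    simp only [List.foldl_cons, List.map_cons, pvW]
    rw [ih, inner_shift]
    ring

lemma countsFold (grid : List (List String)) (acc : List Int) :
    grid.foldl
      (fun (acc : List Int) row =>
        acc ++ [row.foldl (fun c cell => if cell == "O" then c + 1 else c) 0])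
      acc = acc ++ grid.map pvCnt := by
  induction grid generalizing acc with
  | nil => simp
  | cons row rest ih =>
    simp only [List.foldl_cons, List.map_cons]
    rw [ih]
    simp [pvCnt]

lemma foldB (l : List Int) (d s : Int) :
    (l.foldl (fun (st : Int × Int) c => (st.1 + 1, st.2 + (st.1 + 1) * c)) (d, s)).2
      = s + pvG d l := by
  induction l generalizing d s with
  | nil => simp [pvG]
  | cons c cs ih =>
    simp only [List.foldl_cons, pvG]
    rw [ih]
    ring

lemma pvG_append (xs ys : List Int) (d : Int) :
    pvG d (xs ++ ys) = pvG d xs + pvG (d + xs.length) ys := by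
  induction xs generalizing d with
  | nil => simp [pvG]
  | cons c cs ih =>
    simp only [List.cons_append, pvG, ih, List.length_cons]
    push_cast
    ring_nf

lemma pvW_eq_pvG_reverse (l : List Int) (d : Int) :
    pvW (d + l.length) l = pvG d l.reverse := by
  induction l generalizing d with
  | nil => simp [pvW, pvG]
  | cons c cs ih =>
    simp only [List.reverse_cons, pvW, List.length_cons]
    rw [pvG_append]
    have h : (d + ((cs.length : Int) + 1) - 1) = d + cs.length := by ring
    push_cast
    rw [h, ih]
    simp [pvG, List.length_reverse]
    ring

-- ===== VERDICT (by name: the statement is the Claim_ definition above) =====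
theorem eval_grid_order_spec : Claim_equal_eval_grid_order := by
  intro grid _
  unfold Spec_eval_grid_order eval_grid_order eval_grid_order_alt
  rw [foldA, countsFold, List.nil_append, foldB]
  have h := pvW_eq_pvG_reverse (grid.map pvCnt) 0
  simp only [List.length_map, zero_add] at h
  rw [h]
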